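-- pv_equiv track=rewrite | github.com/thealper2/codewars-solutions | 7-kyu/simple_fun_347_bulb_maze_1.py | bulb_maze
-- ===== SOURCE A (Python) =====
-- def bulb_maze(maze):
--     for i, room in enumerate(maze):
--         if room == ' ':
--             continue
--
--         if room == 'o':
--             if i % 2 == 0:
--                 return False
--         elif room == 'x':
--             if i % 2 == 1:
--                 return False
--
--     return True
-- ===== SOURCE B (Python) =====
-- def bulb_maze(maze):
--     # 'o' may not sit at an even index, 'x' may not sit at an odd index.
--     return 'o' not in maze[::2] and 'x' not in maze[1::2]
-- ===== Notes on version B (the rewrite author's own statement) =====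
-- stated objective: simpler
-- what changed: Replaces the index-by-index scan with a parity branch per character by two slice-and-membership tests: the even-index slice maze[::2] must contain no o-bulb and the odd-index slice maze[1::2] no x-bulb.
import Mathlib
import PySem

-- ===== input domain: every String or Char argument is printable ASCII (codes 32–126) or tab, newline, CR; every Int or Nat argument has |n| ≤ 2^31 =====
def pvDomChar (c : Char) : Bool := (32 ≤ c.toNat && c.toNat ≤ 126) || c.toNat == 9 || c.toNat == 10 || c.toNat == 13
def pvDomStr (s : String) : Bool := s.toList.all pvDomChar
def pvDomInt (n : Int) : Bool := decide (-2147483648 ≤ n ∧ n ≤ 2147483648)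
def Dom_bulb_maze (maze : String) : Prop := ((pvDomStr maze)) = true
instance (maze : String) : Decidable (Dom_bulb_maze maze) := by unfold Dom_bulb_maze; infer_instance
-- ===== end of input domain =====

-- B replaces the per-character parity scan by two slice-and-membership checks ('o' not in maze[::2], 'x' not in maze[1::2]); objective: simpler.

-- ===== PORT A =====
-- the enumerate loop: index i, early return False on a misplaced bulb
def bulbLoop : Nat → List Char → Bool
  | _, [] => true
  | i, c :: rest =>
    if c = ' ' then bulbLoop (i+1) rest
    else if c = 'o' then
      (if i % 2 = 0 then false else bulbLoop (i+1) rest)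
    else if c = 'x' then
      (if i % 2 = 1 then false else bulbLoop (i+1) rest)
    else bulbLoop (i+1) rest

def bulb_maze (maze : String) : Bool := bulbLoop 0 maze.toList

-- ===== PORT B =====
-- maze[::2] and maze[1::2] are the step-2 slices (PySem.List.slice?, total for step 2);
-- 'o' not in ev / 'x' not in od is single-char membership.
def bulb_maze_alt (maze : String) : Bool :=
  let ev := (PySem.List.slice? maze.toList none none 2).getD []
  let od := (PySem.List.slice? maze.toList (some 1) none 2).getD []
  !(ev.contains 'o') && !(od.contains 'x')

-- ===== PRECONDITION & SPEC =====
def Spec_bulb_maze (maze : String) (out : Bool) : Prop := out = bulb_maze_alt maze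
instance (maze : String) (out : Bool) : Decidable (Spec_bulb_maze maze out) := by unfold Spec_bulb_maze; infer_instance

-- ===== CLAIM (what is proved, stated in full; the proofs are below) =====
def Claim_equal_bulb_maze : Prop := ∀ (maze : String), Dom_bulb_maze maze → Spec_bulb_maze maze (bulb_maze maze)

-- ===== LEMMAS AND PROOFS =====

-- the even-index elements of a list (everyOther l) and, via l.tail, the odd-index ones
def everyOther {α : Type} : List α → List α
  | [] => []
  | [c] => [c]
  | c :: _ :: rest => c :: everyOther rest

lemma everyOther_cons {α : Type} (c : α) (rest : List α) :
    everyOther (c :: rest) = c :: everyOther rest.tail := by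
  cases rest <;> simp [everyOther]

lemma core {α : Type} (xs : List α) :
    List.filterMap (fun k => xs[2*k]?) (List.range ((xs.length+1)/2)) = everyOther xs := by
  induction xs using everyOther.induct with
  | case1 => simp [everyOther]
  | case2 c => simp [everyOther]
  | case3 c d rest ih =>
    have h : (((c :: d :: rest).length + 1) / 2) = (rest.length+1)/2 + 1 := by
      simp; omega
    rw [h, List.range_succ_eq_map, List.filterMap_cons, List.filterMap_map]
    have e : ((fun k => (c :: d :: rest)[2 * k]?) ∘ Nat.succ) = (fun k => rest[2 * k]?) := by
      funext k
      show (c :: d :: rest)[2 * (k+1)]? = rest[2*k]?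
      have : 2 * (k+1) = (2*k+1)+1 := by omega
      rw [this, List.getElem?_cons_succ, List.getElem?_cons_succ]
    rw [e, ih]
    simp [everyOther]

lemma slice_ev {α : Type} (xs : List α) :
    PySem.List.slice? xs none none 2 = some (everyOther xs) := by
  cases xs with
  | nil => rfl
  | cons c rest =>
    simp only [PySem.List.slice?, PySem.List.sliceIndices]
    norm_num
    have e1 : ((((rest.length:Int)) + 1 + 2 - 1) / 2).toNat = (((c :: rest).length) + 1) / 2 := by
      simp only [List.length_cons]
      omega
    have e2 : (fun x : Nat => (c :: rest)[((2:Int) * ↑x).toNat]?) = (fun k : Nat => (c :: rest)[2*k]?) := by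
      funext x
      have : ((2:Int) * ↑x).toNat = 2*x := by omega
      rw [this]
    rw [e1, e2]
    exact core _

lemma slice_od {α : Type} (xs : List α) :
    PySem.List.slice? xs (some 1) none 2 = some (everyOther xs.tail) := by
  cases xs with
  | nil => rfl
  | cons c rest =>
    simp only [PySem.List.slice?, PySem.List.sliceIndices]
    norm_num
    have e1 : (if 0 < rest.length then (((rest.length:Int) + 2 - 1) / 2).toNat else 0) = (rest.length + 1)/2 := by
      split <;> omega
    have e2 : (fun x : Nat => (c :: rest)[((1:Int) + 2 * ↑x).toNat]?) = (fun k : Nat => rest[2*k]?) := by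
      funext x
      have : ((1:Int) + 2 * ↑x).toNat = (2*x) + 1 := by omega
      rw [this, List.getElem?_cons_succ]
    rw [e1, e2]
    exact core rest

lemma loopChar (l : List Char) : ∀ i : Nat,
    bulbLoop i l = if i % 2 = 0
      then (!(everyOther l).contains 'o' && !(everyOther l.tail).contains 'x')
      else (!(everyOther l).contains 'x' && !(everyOther l.tail).contains 'o') := by
  induction l with
  | nil => intro i; rcases Nat.mod_two_eq_zero_or_one i with h | h <;> simp [bulbLoop, everyOther, h]
  | cons c rest ih =>
    intro i
    rw [bulbLoop, everyOther_cons, List.tail_cons]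
    rcases Nat.mod_two_eq_zero_or_one i with h | h
    · have h1 : (i+1) % 2 = 1 := by omega
      by_cases hc : c = ' '
      · simp [hc, h, h1, ih, Bool.and_comm]
      · by_cases ho : c = 'o'
        · simp [hc, ho, h, Bool.and_comm]
        · by_cases hx : c = 'x'
          · simp [hc, hx, Ne.symm ho, h, h1, ih, Bool.and_comm]
          · simp [hc, ho, hx, Ne.symm ho, Ne.symm hx, h, h1, ih, Bool.and_comm]
    · have h1 : (i+1) % 2 = 0 := by omega
      by_cases hc : c = ' '
      · simp [hc, h, h1, ih, Bool.and_comm]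
      · by_cases ho : c = 'o'
        · simp [hc, ho, h, h1, ih, Bool.and_comm]
        · by_cases hx : c = 'x'
          · simp [hc, ho, hx, Ne.symm ho, h, Bool.and_comm]
          · simp [hc, ho, hx, Ne.symm ho, Ne.symm hx, h, h1, ih, Bool.and_comm]

-- ===== VERDICT (by name: the statement is the Claim_ definition above) =====
theorem bulb_maze_spec : Claim_equal_bulb_maze := by
  intro maze _
  unfold Spec_bulb_maze bulb_maze bulb_maze_alt
  rw [loopChar]
  simp [slice_ev, slice_od]
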